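-- pv_equiv track=rewrite | github.com/64andy/Advent-of-Code | 2023/12/2_answer.py | springs_to_layout
-- ===== SOURCE A (Python) =====
-- def springs_to_layout(springs: str, block_chars: list[str]) -> list[int]:
--     """
--     Converts a springs string into the layout formation.
--     """
--     layout = []
--     current_count = 0
--     in_damaged = False
--     for char in springs:
--         # If we're in a 'run', continue counting it
--         if char in block_chars:
--             in_damaged = True
--             current_count += 1
--         # If we're not in a run, but we were in one, that means it just ended
--         elif in_damaged:
--             layout.append(current_count)
--             current_count = 0
--             in_damaged = False
--         # If we're not in a run, and we didn't read a damaged tile, do nothing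
--         else:
--             pass
--     # If we ended on a line, don't forget to add it
--     if in_damaged:
--         layout.append(current_count)
--
--     return layout
-- ===== SOURCE B (Python) =====
-- def springs_to_layout(springs: str, block_chars: list[str]) -> list[int]:
--     """Run-scanner: jump over each maximal block run in one inner scan,
--     no boolean state machine and no trailing flush."""
--     layout = []
--     i, n = 0, len(springs)
--     while i < n:
--         if springs[i] in block_chars:
--             j = i + 1
--             while j < n and springs[j] in block_chars:
--                 j += 1
--             layout.append(j - i)
--             i = j
--         else:
--             i += 1
--     return layout
-- ===== Notes on version B (the rewrite author's own statement) =====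
-- stated objective: alternative
-- what changed: Replaces A's per-character boolean state machine (in_damaged/current_count with a trailing flush) by a run-scanner that, on meeting a block character, scans the whole maximal run at once with an inner loop and appends its length directly.
import Mathlib
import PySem

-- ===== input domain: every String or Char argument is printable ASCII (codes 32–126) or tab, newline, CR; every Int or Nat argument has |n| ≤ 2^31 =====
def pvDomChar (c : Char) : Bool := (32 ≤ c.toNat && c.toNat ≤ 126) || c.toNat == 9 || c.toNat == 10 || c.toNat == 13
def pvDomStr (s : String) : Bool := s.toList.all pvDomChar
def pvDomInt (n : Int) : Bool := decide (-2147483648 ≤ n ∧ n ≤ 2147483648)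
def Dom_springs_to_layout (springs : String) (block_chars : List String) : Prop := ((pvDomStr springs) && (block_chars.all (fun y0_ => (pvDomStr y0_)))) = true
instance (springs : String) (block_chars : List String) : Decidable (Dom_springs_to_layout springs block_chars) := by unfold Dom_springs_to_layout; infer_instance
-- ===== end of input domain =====

-- B replaces A's boolean state machine by a direct run-scanner; objective: alternative decomposition.

-- ===== PORT A =====
-- `char in block_chars` : the 1-char string made from char, tested against the list
def pvA_step (block_chars : List String) (st : List Int × Int × Bool) (char : Char) : List Int × Int × Bool :=
  if block_chars.contains (String.mk [char]) then (st.1, st.2.1 + 1, true)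
  else if st.2.2 then (st.1 ++ [st.2.1], 0, false)
  else st

def springs_to_layout (springs : String) (block_chars : List String) : List Int :=
  let st := springs.toList.foldl (pvA_step block_chars) ([], 0, false)
  if st.2.2 then st.1 ++ [st.2.1] else st.1

-- ===== PORT B =====
def pvB_mem (block_chars : List String) (c : Char) : Bool := block_chars.contains (String.mk [c])

-- outer while loop: on a block char, the inner while loop scans the maximal run at once
def pvB_scan (block_chars : List String) : List Char → List Int
  | [] => []
  | c :: cs =>
      if pvB_mem block_chars c then
        ((cs.takeWhile (pvB_mem block_chars)).length + 1 : Int) ::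
          pvB_scan block_chars (cs.dropWhile (pvB_mem block_chars))
      else pvB_scan block_chars cs
  termination_by l => l.length
  decreasing_by
    · exact Nat.lt_succ_of_le (List.length_dropWhile_le _ _)
    · simp

def springs_to_layout_alt (springs : String) (block_chars : List String) : List Int :=
  pvB_scan block_chars springs.toList

-- ===== PRECONDITION & SPEC =====
def Spec_springs_to_layout (springs : String) (block_chars : List String) (out : List Int) : Prop := out = springs_to_layout_alt springs block_chars
instance (springs : String) (block_chars : List String) (out : List Int) : Decidable (Spec_springs_to_layout springs block_chars out) := by unfold Spec_springs_to_layout; infer_instance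

-- ===== CLAIM (what is proved, stated in full; the proofs are below) =====
def Claim_equal_springs_to_layout : Prop := ∀ (springs : String) (block_chars : List String), Dom_springs_to_layout springs block_chars → Spec_springs_to_layout springs block_chars (springs_to_layout springs block_chars)

-- ===== LEMMAS AND PROOFS =====

def pvFinish (st : List Int × Int × Bool) : List Int :=
  if st.2.2 then st.1 ++ [st.2.1] else st.1

theorem pv_loop_inv (block_chars : List String) :
    ∀ (cs : List Char) (layout : List Int) (cnt : Int) (flag : Bool),
      (flag = false → cnt = 0) →
      pvFinish (cs.foldl (pvA_step block_chars) (layout, cnt, flag)) =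
        layout ++ (if flag then
            (cnt + ((cs.takeWhile (pvB_mem block_chars)).length : Int)) ::
              pvB_scan block_chars (cs.dropWhile (pvB_mem block_chars))
          else pvB_scan block_chars cs) := by
  intro cs
  induction cs with
  | nil =>
      intro layout cnt flag h
      cases flag with
      | false => simp [pvFinish, pvB_scan]
      | true => simp [pvFinish, pvB_scan]
  | cons c cs ih =>
      intro layout cnt flag h
      by_cases hm : pvB_mem block_chars c
      · have hstep : pvA_step block_chars (layout, cnt, flag) c = (layout, cnt + 1, true) := by
          simp [pvA_step, pvB_mem] at hm ⊢; simp [hm]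
        rw [List.foldl_cons, hstep, ih layout (cnt + 1) true (by simp)]
        cases flag with
        | true =>
            simp [List.takeWhile, List.dropWhile, hm]
            ring_nf
        | false =>
            have hc : cnt = 0 := h rfl
            subst hc
            simp [pvB_scan, List.takeWhile, List.dropWhile, hm]
            ring_nf
      · cases flag with
        | true =>
            have hstep : pvA_step block_chars (layout, cnt, true) c = (layout ++ [cnt], 0, false) := by
              simp [pvA_step, pvB_mem] at hm ⊢; simp [hm]
            rw [List.foldl_cons, hstep, ih (layout ++ [cnt]) 0 false (fun _ => rfl)]
            simp [pvB_scan, List.takeWhile, List.dropWhile, hm]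
        | false =>
            have hstep : pvA_step block_chars (layout, cnt, false) c = (layout, cnt, false) := by
              simp [pvA_step, pvB_mem] at hm ⊢; simp [hm]
            rw [List.foldl_cons, hstep, ih layout cnt false h]
            simp [pvB_scan, hm]

-- ===== VERDICT (by name: the statement is the Claim_ definition above) =====
theorem springs_to_layout_spec : Claim_equal_springs_to_layout := by
  intro springs block_chars _
  unfold Spec_springs_to_layout springs_to_layout springs_to_layout_alt
  have := pv_loop_inv block_chars springs.toList [] 0 false (fun _ => rfl)
  simpa [pvFinish] using this
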